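-- pv_equiv track=rewrite | github.com/ibaiape/easyhunting | utils/attack_navigator/navigator_gen.py | get_techniques
-- ===== SOURCE A (Python) =====
-- from collections import defaultdict
--
-- def get_color_by_intel(intel):
--     if intel == 'capa':
--         return '#f5e380'
--     if intel == 'virustotal':
--         return '#9dcdff'
--     if intel == 'alienvault':
--         return '#b7e083'
--     if intel == 'triage':
--         return '#e96767'
--
-- def get_techniques(mitre):
--     intels = ['capa', 'virustotal', 'alienvault', 'triage'] # sorted by less confidence (for me)
--     techniques = defaultdict(dict)
--     for intel in intels:
--         if not mitre.get(intel):
--             continue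
--         for technique in mitre.get(intel):
--             one = dict()
--             if techniques.get(technique):
--                 one = techniques.get(technique)
--                 one['color'] = get_color_by_intel(intel)
--                 one['comment'] = one['comment'] + intel + '\n'
--             else:
--                 one['techniqueID'] = technique
--                 one['color'] = get_color_by_intel(intel)
--                 one['comment'] = intel + '\n'
--             techniques[technique] = one
--     return list(techniques.values())
-- ===== SOURCE B (Python) =====
-- def get_color_by_intel(intel):
--     if intel == 'capa':
--         return '#f5e380'
--     if intel == 'virustotal':
--         return '#9dcdff'
--     if intel == 'alienvault':
--         return '#b7e083'
--     if intel == 'triage':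
--         return '#e96767'
--
-- def get_techniques(mitre):
--     intels = ['capa', 'virustotal', 'alienvault', 'triage']
--     occurrences = {}
--     for intel in intels:
--         for technique in (mitre.get(intel) or []):
--             occurrences.setdefault(technique, []).append(intel)
--     return [{'techniqueID': technique,
--              'color': get_color_by_intel(sources[-1]),
--              'comment': ''.join(source + '\n' for source in sources)}
--             for technique, sources in occurrences.items()]
-- ===== Notes on version B (the rewrite author's own statement) =====
-- stated objective: alternative
-- what changed: B separates aggregation from construction: one pass groups every (intel, technique) occurrence into an insertion-ordered dict technique -> list of intels, then a second pass builds each output row (color from the last intel, comment joined from the list), instead of A's in-place mutation of partially built result dicts inside the nested loops.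
import Mathlib
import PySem

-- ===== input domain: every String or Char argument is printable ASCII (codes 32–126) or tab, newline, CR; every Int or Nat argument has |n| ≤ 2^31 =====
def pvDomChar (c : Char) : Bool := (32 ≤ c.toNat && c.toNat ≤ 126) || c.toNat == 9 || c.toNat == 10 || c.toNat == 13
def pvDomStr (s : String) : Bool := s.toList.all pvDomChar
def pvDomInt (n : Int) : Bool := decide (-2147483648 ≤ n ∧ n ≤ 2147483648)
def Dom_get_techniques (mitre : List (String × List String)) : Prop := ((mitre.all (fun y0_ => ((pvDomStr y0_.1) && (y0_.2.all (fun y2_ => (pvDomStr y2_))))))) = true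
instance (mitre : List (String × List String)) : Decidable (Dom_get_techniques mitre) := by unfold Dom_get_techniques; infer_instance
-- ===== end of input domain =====

-- B separates aggregation (technique -> list of intels) from row construction, instead of A's in-place
-- mutation of partially built result dicts inside the nested loops (objective: alternative decomposition).


-- ===== PORT A =====
-- shared helper (module-level function used by both A and B)
-- Python returns None when intel is none of the four; both programs only ever call it with the
-- four intel names (B with sources[-1], an element of intels), so "" stands for that unreachable None.
def get_color_by_intel (intel : String) : String :=
  if intel == "capa" then "#f5e380"
  else if intel == "virustotal" then "#9dcdff"
  else if intel == "alienvault" then "#b7e083"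
  else if intel == "triage" then "#e96767"
  else ""

-- truthiness of techniques.get(technique): None and the empty dict are falsy
def pvDictTruthy (o : Option (PySem.Dict String String)) : Bool :=
  match o with
  | none => false
  | some d => !d.items.isEmpty

-- body of A's inner loop: one iteration for one technique of one intel
def pvStepA (intel : String) (tq : PySem.Dict String (PySem.Dict String String))
    (technique : String) : PySem.Dict String (PySem.Dict String String) :=
  if pvDictTruthy (tq.get? technique) then
    let one := (tq.get? technique).getD PySem.Dict.empty
    let one := one.insert "color" (get_color_by_intel intel)
    -- one['comment'] always exists in a stored dict, so the KeyError default "" is never used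
    let one := one.insert "comment" (one.getD "comment" "" ++ intel ++ "\n")
    tq.insert technique one
  else
    let one := PySem.Dict.empty.insert "techniqueID" technique
    let one := one.insert "color" (get_color_by_intel intel)
    let one := one.insert "comment" (intel ++ "\n")
    tq.insert technique one

def get_techniques (mitre : List (String × List String)) : List (List (String × String)) :=
  let intels := ["capa", "virustotal", "alienvault", "triage"]
  let techniques := intels.foldl (fun tq intel =>
    match (PySem.Dict.mk mitre).get? intel with
    | none => tq                                   -- mitre.get(intel) is None: continue
    | some ts => if ts.isEmpty then tq             -- empty list is falsy: continue
                 else ts.foldl (pvStepA intel) tq) PySem.Dict.empty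
  techniques.values.map PySem.Dict.items

-- ===== PORT B =====
-- occurrences.setdefault(technique, []).append(intel)
def pvStepB (intel : String) (occ : PySem.Dict String (List String)) (technique : String) :
    PySem.Dict String (List String) :=
  occ.modify technique [] (· ++ [intel])

-- one output row; sources is never empty, so the IndexError default "" of sources[-1] is never used
def pvRow (technique : String) (sources : List String) : List (String × String) :=
  [("techniqueID", technique),
   ("color", get_color_by_intel ((PySem.List.pyGet? sources (-1)).getD "")),
   ("comment", PySem.Str.join "" (sources.map (fun s => s ++ "\n")))]

def get_techniques_alt (mitre : List (String × List String)) : List (List (String × String)) :=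
  let intels := ["capa", "virustotal", "alienvault", "triage"]
  let occurrences := intels.foldl (fun occ intel =>
    (((PySem.Dict.mk mitre).get? intel).getD []).foldl (pvStepB intel) occ) PySem.Dict.empty
  occurrences.items.map (fun p => pvRow p.1 p.2)

-- ===== PRECONDITION & SPEC =====
def Spec_get_techniques (mitre : List (String × List String)) (out : List (List (String × String))) : Prop := out = get_techniques_alt mitre
instance (mitre : List (String × List String)) (out : List (List (String × String))) : Decidable (Spec_get_techniques mitre out) := by unfold Spec_get_techniques; infer_instance

-- ===== CLAIM (what is proved, stated in full; the proofs are below) =====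
def Claim_equal_get_techniques : Prop := ∀ (mitre : List (String × List String)), Dom_get_techniques mitre → Spec_get_techniques mitre (get_techniques mitre)

-- ===== LEMMAS AND PROOFS =====

-- A's state, expressed as a function of B's aggregation state
def pvMapD (occ : PySem.Dict String (List String)) : PySem.Dict String (PySem.Dict String String) :=
  PySem.Dict.mk (occ.items.map (fun p => (p.1, PySem.Dict.mk (pvRow p.1 p.2))))

def pvInv (occ : PySem.Dict String (List String)) : Prop :=
  occ.keys.Nodup ∧ ∀ p ∈ occ.items, p.2 ≠ []

theorem pv_intercalate_nil (xs : List (List Char)) : List.intercalate [] xs = xs.flatten := by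
  induction xs with
  | nil => rfl
  | cons a l ih =>
    cases l with
    | nil => simp [List.intercalate]
    | cons b m =>
      simp only [List.intercalate, List.intersperse] at ih ⊢
      simp_all

theorem pv_join_snoc (xs : List String) (y : String) :
    PySem.Str.join "" (xs ++ [y]) = PySem.Str.join "" xs ++ y := by
  simp [PySem.Str.join, PySem.Chars.join, pv_intercalate_nil]

theorem pv_join_single (s : String) :
    PySem.Str.join "" [s ++ "\n"] = s ++ "\n" := by
  simp [PySem.Str.join, PySem.Chars.join, pv_intercalate_nil]

theorem pv_get?_mapD (occ : PySem.Dict String (List String)) (t : String) :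
    (pvMapD occ).get? t = (occ.get? t).map (fun l => PySem.Dict.mk (pvRow t l)) := by
  obtain ⟨ms⟩ := occ
  induction ms with
  | nil => rfl
  | cons p rest ih =>
    obtain ⟨k, v⟩ := p
    simp only [pvMapD, List.map_cons] at ih ⊢
    rw [PySem.Dict.get?_mk_cons, PySem.Dict.get?_mk_cons]
    by_cases h : k == t
    · simp only [h, if_true]
      simp at h; subst h; rfl
    · simp only [h]
      simpa using ih

theorem pv_contains_mapD (occ : PySem.Dict String (List String)) (t : String) :
    (pvMapD occ).contains t = occ.contains t := by
  rw [PySem.Dict.contains_eq_isSome_get?, PySem.Dict.contains_eq_isSome_get?, pv_get?_mapD]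
  cases occ.get? t <;> rfl

theorem pv_inv_step (intel : String) (occ : PySem.Dict String (List String)) (t : String)
    (h : pvInv occ) : pvInv (pvStepB intel occ t) := by
  obtain ⟨hnd, hne⟩ := h
  unfold pvStepB PySem.Dict.modify
  refine ⟨PySem.Dict.nodup_keys_insert _ _ _ hnd, ?_⟩
  intro p hp
  rw [PySem.Dict.mem_items_insert] at hp
  rcases hp with hp | ⟨hp, _⟩
  · subst hp; simp
  · exact hne p hp

theorem pv_sim_step (intel : String) (occ : PySem.Dict String (List String)) (t : String)
    (h : pvInv occ) : pvStepA intel (pvMapD occ) t = pvMapD (pvStepB intel occ t) := by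
  obtain ⟨hnd, hne⟩ := h
  unfold pvStepA pvStepB PySem.Dict.modify
  rw [pv_get?_mapD]
  cases hlk : occ.get? t with
  | none =>
    have hc : occ.contains t = false := by
      rw [PySem.Dict.contains_eq_isSome_get?, hlk]; rfl
    have hcm : (pvMapD occ).contains t = false := by rw [pv_contains_mapD]; exact hc
    rw [PySem.Dict.getD_of_get?_eq_none _ _ hlk]
    simp only [Option.map_none]
    show (pvMapD occ).insert t _ = pvMapD (occ.insert t ([] ++ [intel]))
    apply PySem.Dict.ext
    rw [PySem.Dict.items_insert_of_not_contains _ _ hcm]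
    unfold pvMapD
    rw [PySem.Dict.items_insert_of_not_contains _ _ hc, List.map_append]
    congr 1
    simp only [List.map_cons, List.map_nil, List.nil_append]
    congr 2
    apply PySem.Dict.ext
    show [("techniqueID", t), ("color", get_color_by_intel intel), ("comment", intel ++ "\n")] =
      pvRow t ([] ++ [intel])
    simp [pvRow, pv_join_single, PySem.List.pyGet?, PySem.List.pyIdx?]
  | some l =>
    have hc : occ.contains t = true := by
      rw [PySem.Dict.contains_eq_isSome_get?, hlk]; rfl
    have hcm : (pvMapD occ).contains t = true := by rw [pv_contains_mapD]; exact hc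
    rw [PySem.Dict.getD_of_get?_eq_some _ _ hlk]
    simp only [Option.map_some]
    have htr : pvDictTruthy (some (PySem.Dict.mk (pvRow t l))) = true := rfl
    rw [htr]
    simp only [if_true, Option.getD_some]
    apply PySem.Dict.ext
    rw [PySem.Dict.items_insert_of_contains _ _ hcm]
    unfold pvMapD
    rw [PySem.Dict.items_insert_of_contains _ _ hc, List.map_map, List.map_map]
    apply List.map_congr_left
    intro p hp
    by_cases hpt : (p.1 == t) = true
    · simp only [Function.comp, hpt, if_true]
      congr 1
      apply PySem.Dict.ext
      show [("techniqueID", t), ("color", get_color_by_intel intel),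
            ("comment", PySem.Str.join "" (l.map (fun s => s ++ "\n")) ++ intel ++ "\n")] =
        pvRow t (l ++ [intel])
      simp [pvRow, pv_join_snoc, String.append_assoc]
    · simp only [Function.comp, hpt, if_false, Bool.false_eq_true]

theorem pv_sim_fold (intel : String) (ts : List String) (occ : PySem.Dict String (List String))
    (h : pvInv occ) :
    ts.foldl (pvStepA intel) (pvMapD occ) = pvMapD (ts.foldl (pvStepB intel) occ) ∧
      pvInv (ts.foldl (pvStepB intel) occ) := by
  induction ts generalizing occ with
  | nil => exact ⟨rfl, h⟩
  | cons t ts ih =>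
    simp only [List.foldl_cons]
    rw [pv_sim_step intel occ t h]
    exact ih _ (pv_inv_step intel occ t h)

theorem pv_sim_intels (intels : List String) (mitre : List (String × List String))
    (occ : PySem.Dict String (List String)) (h : pvInv occ) :
    intels.foldl (fun tq intel =>
        match (PySem.Dict.mk mitre).get? intel with
        | none => tq
        | some ts => if ts.isEmpty then tq else ts.foldl (pvStepA intel) tq) (pvMapD occ) =
      pvMapD (intels.foldl (fun occ intel =>
        (((PySem.Dict.mk mitre).get? intel).getD []).foldl (pvStepB intel) occ) occ) := by
  induction intels generalizing occ with
  | nil => rfl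
  | cons intel rest ih =>
    simp only [List.foldl_cons]
    have hstep : (match (PySem.Dict.mk mitre).get? intel with
        | none => pvMapD occ
        | some ts => if ts.isEmpty then pvMapD occ else ts.foldl (pvStepA intel) (pvMapD occ)) =
        pvMapD ((((PySem.Dict.mk mitre).get? intel).getD []).foldl (pvStepB intel) occ) := by
      cases hlk : (PySem.Dict.mk mitre).get? intel with
      | none => rfl
      | some ts =>
        cases ts with
        | nil => rfl
        | cons x xs =>
          simp only [List.isEmpty_cons, if_neg (by decide : ¬ (false = true)), Option.getD_some]
          exact (pv_sim_fold intel (x :: xs) occ h).1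
    rw [hstep]
    exact ih _ ((pv_sim_fold intel (((PySem.Dict.mk mitre).get? intel).getD []) occ h).2)

-- ===== VERDICT (by name: the statement is the Claim_ definition above) =====
theorem get_techniques_spec : Claim_equal_get_techniques := by
  intro mitre _
  unfold Spec_get_techniques get_techniques get_techniques_alt
  have h := pv_sim_intels ["capa", "virustotal", "alienvault", "triage"] mitre PySem.Dict.empty
    ⟨by decide, by intro p hp; cases hp⟩
  rw [show pvMapD PySem.Dict.empty = PySem.Dict.empty from rfl] at h
  simp only at h ⊢
  rw [h]
  simp [pvMapD, PySem.Dict.values, List.map_map, Function.comp]
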